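-- pv_equiv track=rewrite | github.com/seanchatmangpt/chatman-nano-stack | cns_forge_critical_path_validator.py | _validate_traced_path
-- ===== SOURCE A (Python) =====
-- from typing import Dict, List, Any, Tuple, Optional
--
-- def _validate_traced_path(path: List[str]) -> Dict[str, bool]:
--     """Validate properties of the traced path"""
--     validations = {
--         "complete_path": len(path) > 1,
--         "includes_generator": any("generator" in p or "implementation" in p for p in path),
--         "includes_template": any(".j2" in p for p in path),
--         "semantic_to_code": any(".ttl" in p for p in path) and any(p.endswith(('.c', '.ex', '.py')) for p in path)
--     }
--
--     return validations
-- ===== SOURCE B (Python) =====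
-- from typing import Dict, List
--
-- _GEN, _TPL, _TTL, _CODE = 1, 2, 4, 8
--
-- def _mask_of(p: str) -> int:
--     """Classify one path element into a feature bitmask."""
--     m = 0
--     if "generator" in p or "implementation" in p:
--         m |= _GEN
--     if ".j2" in p:
--         m |= _TPL
--     if ".ttl" in p:
--         m |= _TTL
--     if p.endswith(('.c', '.ex', '.py')):
--         m |= _CODE
--     return m
--
-- def _validate_traced_path(path: List[str]) -> Dict[str, bool]:
--     """Validate properties of the traced path via a bitmask fold."""
--     m = 0
--     for p in path:
--         m |= _mask_of(p)
--     return {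
--         "complete_path": len(path) > 1,
--         "includes_generator": (m & _GEN) != 0,
--         "includes_template": (m & _TPL) != 0,
--         "semantic_to_code": (m & (_TTL | _CODE)) == (_TTL | _CODE),
--     }
-- ===== Notes on version B (the rewrite author's own statement) =====
-- stated objective: alternative
-- what changed: Each element is classified once into an integer feature bitmask, the masks are OR-folded into a single int, and the four booleans are decoded from its bits afterwards, replacing A's four independent any() scans.
import Mathlib
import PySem

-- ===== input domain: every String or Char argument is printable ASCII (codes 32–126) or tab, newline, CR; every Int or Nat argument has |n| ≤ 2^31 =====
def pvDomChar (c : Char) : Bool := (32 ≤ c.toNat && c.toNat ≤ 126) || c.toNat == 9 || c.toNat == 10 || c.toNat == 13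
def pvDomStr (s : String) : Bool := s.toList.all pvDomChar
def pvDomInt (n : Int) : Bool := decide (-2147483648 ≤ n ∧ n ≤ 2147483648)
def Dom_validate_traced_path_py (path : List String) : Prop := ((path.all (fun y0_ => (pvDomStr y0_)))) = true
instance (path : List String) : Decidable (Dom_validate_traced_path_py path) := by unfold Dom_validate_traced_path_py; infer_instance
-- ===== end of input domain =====

-- B classifies each element once into an integer feature bitmask, OR-folds the masks, and decodes the four booleans from bits.

-- ===== PORT A =====
def validate_traced_path_py (path : List String) : List (String × Bool) :=
  [("complete_path", decide ((path.length : Int) > 1)),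
   ("includes_generator", path.any (fun p => PySem.Str.isIn "generator" p || PySem.Str.isIn "implementation" p)),
   ("includes_template", path.any (fun p => PySem.Str.isIn ".j2" p)),
   ("semantic_to_code", (path.any (fun p => PySem.Str.isIn ".ttl" p)) &&
      (path.any (fun p => PySem.Str.endswith p ".c" || PySem.Str.endswith p ".ex" || PySem.Str.endswith p ".py")))]

-- ===== PORT B =====
-- per-element feature bitmask (bits: 1 generator, 2 template, 4 ttl, 8 code)
def pvMaskOf (p : String) : Int :=
  let m : Int := 0
  let m := if PySem.Str.isIn "generator" p || PySem.Str.isIn "implementation" p then Int.lor m 1 else m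
  let m := if PySem.Str.isIn ".j2" p then Int.lor m 2 else m
  let m := if PySem.Str.isIn ".ttl" p then Int.lor m 4 else m
  let m := if PySem.Str.endswith p ".c" || PySem.Str.endswith p ".ex" || PySem.Str.endswith p ".py" then Int.lor m 8 else m
  m

def validate_traced_path_py_alt (path : List String) : List (String × Bool) :=
  let m : Int := path.foldl (fun m p => Int.lor m (pvMaskOf p)) 0
  [("complete_path", decide ((path.length : Int) > 1)),
   ("includes_generator", decide (Int.land m 1 ≠ 0)),
   ("includes_template", decide (Int.land m 2 ≠ 0)),
   ("semantic_to_code", decide (Int.land m 12 = 12))]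

-- ===== PRECONDITION & SPEC =====
def Spec_validate_traced_path_py (path : List String) (out : List (String × Bool)) : Prop := out = validate_traced_path_py_alt path
instance (path : List String) (out : List (String × Bool)) : Decidable (Spec_validate_traced_path_py path out) := by unfold Spec_validate_traced_path_py; infer_instance

-- ===== CLAIM (what is proved, stated in full; the proofs are below) =====
def Claim_equal_validate_traced_path_py : Prop := ∀ (path : List String), Dom_validate_traced_path_py path → Spec_validate_traced_path_py path (validate_traced_path_py path)

-- ===== LEMMAS AND PROOFS =====
def pvEncode (a b c d : Bool) : Int :=
  Int.lor (Int.lor (Int.lor (cond a (1:Int) 0) (cond b 2 0)) (cond c 4 0)) (cond d 8 0)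

theorem pvEncode_lor (a b c d a' b' c' d' : Bool) :
    Int.lor (pvEncode a b c d) (pvEncode a' b' c' d')
      = pvEncode (a || a') (b || b') (c || c') (d || d') := by
  cases a <;> cases b <;> cases c <;> cases d <;>
    cases a' <;> cases b' <;> cases c' <;> cases d' <;> decide

theorem pvMaskOf_encode (p : String) :
    pvMaskOf p = pvEncode
      (PySem.Str.isIn "generator" p || PySem.Str.isIn "implementation" p)
      (PySem.Str.isIn ".j2" p)
      (PySem.Str.isIn ".ttl" p)
      (PySem.Str.endswith p ".c" || PySem.Str.endswith p ".ex" || PySem.Str.endswith p ".py") := by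
  unfold pvMaskOf
  generalize (PySem.Str.isIn "generator" p || PySem.Str.isIn "implementation" p) = a
  generalize (PySem.Str.isIn ".j2" p) = b
  generalize (PySem.Str.isIn ".ttl" p) = c
  generalize (PySem.Str.endswith p ".c" || PySem.Str.endswith p ".ex" || PySem.Str.endswith p ".py") = d
  cases a <;> cases b <;> cases c <;> cases d <;> decide

theorem pvFold_encode (path : List String) (a b c d : Bool) :
    path.foldl (fun m p => Int.lor m (pvMaskOf p)) (pvEncode a b c d)
      = pvEncode
          (a || path.any (fun p => PySem.Str.isIn "generator" p || PySem.Str.isIn "implementation" p))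
          (b || path.any (fun p => PySem.Str.isIn ".j2" p))
          (c || path.any (fun p => PySem.Str.isIn ".ttl" p))
          (d || path.any (fun p => PySem.Str.endswith p ".c" || PySem.Str.endswith p ".ex" || PySem.Str.endswith p ".py")) := by
  induction path generalizing a b c d with
  | nil => simp
  | cons h tl ih =>
      rw [List.foldl_cons, pvMaskOf_encode, pvEncode_lor, ih]
      simp [Bool.or_assoc]

-- ===== VERDICT (by name: the statement is the Claim_ definition above) =====
theorem validate_traced_path_py_spec : Claim_equal_validate_traced_path_py := by
  intro path _
  show _ = _
  unfold validate_traced_path_py validate_traced_path_py_alt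
  have h0 : (0 : Int) = pvEncode false false false false := by simp [pvEncode, Int.lor]
  simp only [h0, pvFold_encode, Bool.false_or]
  generalize (path.any fun p => PySem.Str.isIn "generator" p || PySem.Str.isIn "implementation" p) = a
  generalize (path.any fun p => PySem.Str.isIn ".j2" p) = b
  generalize (path.any fun p => PySem.Str.isIn ".ttl" p) = c
  generalize (path.any fun p => PySem.Str.endswith p ".c" || PySem.Str.endswith p ".ex" || PySem.Str.endswith p ".py") = d
  cases a <;> cases b <;> cases c <;> cases d <;> simp [pvEncode, Int.lor, Int.land]
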